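-- pv_equiv track=rewrite | github.com/ScientiaCapital/dealer-scraper-mvp | scripts/analysis/apply_icp_scoring.py | score_resimercial
-- ===== SOURCE A (Python) =====
-- from typing import Dict, Tuple
--
-- def normalize_text(text: str) -> str:
--     """Normalize text for keyword matching"""
--     if not text:
--         return ""
--     return text.lower().strip()
--
-- def score_resimercial(contractor: Dict) -> Tuple[int, str]:
--     """
--     Score residential + commercial capability (0-100)
--     Returns: (score, evidence)
--     """
--     name = normalize_text(contractor.get('name', ''))
--     tier = normalize_text(contractor.get('tier', ''))
--
--     # Check for explicit resimercial indicators
--     has_commercial = any(kw in name for kw in ['commercial', 'industrial', 'business'])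
--     has_residential = any(kw in name for kw in ['residential', 'home', 'house'])
--
--     # Elite/Premier tiers often serve both markets
--     is_elite = any(t in tier for t in ['elite', 'premier', 'platinum', 'certified'])
--
--     # Generator dealers often serve both residential and commercial
--     oems = normalize_text(contractor.get('OEMs_Certified', ''))
--     has_generators = any(g in oems for g in ['generac', 'cummins', 'briggs', 'kohler'])
--
--     evidence = []
--
--     if has_commercial and has_residential:
--         score = 100
--         evidence.append("Explicit commercial + residential in name")
--     elif has_commercial:
--         score = 70
--         evidence.append("Commercial indicator in name")
--     elif has_residential:
--         score = 60
--         evidence.append("Residential indicator in name")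
--     elif is_elite and has_generators:
--         score = 75
--         evidence.append("Elite generator dealer (likely serves both markets)")
--     elif has_generators:
--         score = 50
--         evidence.append("Generator dealer (mixed market)")
--     else:
--         score = 40
--         evidence.append("Market scope unclear")
--
--     return score, "; ".join(evidence)
-- ===== SOURCE B (Python) =====
-- def normalize_text(text: str) -> str:
--     """Normalize text for keyword matching"""
--     if not text:
--         return ""
--     return text.lower().strip()
--
--
-- # Full truth table of the scoring policy, indexed by the 4-bit code
-- # 8*has_commercial + 4*has_residential + 2*is_elite + has_generators.
-- _TABLE = [
--     (40, "Market scope unclear"),                                   # 0000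
--     (50, "Generator dealer (mixed market)"),                        # 0001
--     (40, "Market scope unclear"),                                   # 0010
--     (75, "Elite generator dealer (likely serves both markets)"),    # 0011
--     (60, "Residential indicator in name"),                          # 0100
--     (60, "Residential indicator in name"),                          # 0101
--     (60, "Residential indicator in name"),                          # 0110
--     (60, "Residential indicator in name"),                          # 0111
--     (70, "Commercial indicator in name"),                           # 1000
--     (70, "Commercial indicator in name"),                           # 1001
--     (70, "Commercial indicator in name"),                           # 1010
--     (70, "Commercial indicator in name"),                           # 1011
--     (100, "Explicit commercial + residential in name"),             # 1100
--     (100, "Explicit commercial + residential in name"),             # 1101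
--     (100, "Explicit commercial + residential in name"),             # 1110
--     (100, "Explicit commercial + residential in name"),             # 1111
-- ]
--
--
-- def score_resimercial(contractor):
--     name = normalize_text(contractor.get('name', ''))
--     tier = normalize_text(contractor.get('tier', ''))
--     oems = normalize_text(contractor.get('OEMs_Certified', ''))
--
--     idx = (8 * any(kw in name for kw in ['commercial', 'industrial', 'business'])
--            + 4 * any(kw in name for kw in ['residential', 'home', 'house'])
--            + 2 * any(t in tier for t in ['elite', 'premier', 'platinum', 'certified'])
--            + any(g in oems for g in ['generac', 'cummins', 'briggs', 'kohler']))
--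
--     return _TABLE[idx]
-- ===== Notes on version B (the rewrite author's own statement) =====
-- stated objective: alternative
-- what changed: Replaces A's six-way if/elif chain and evidence-list mutation with a branch-free lookup: the four keyword flags are packed into a 4-bit index (8*commercial+4*residential+2*elite+generators) into a precomputed 16-entry truth table of (score, evidence) pairs.
import Mathlib
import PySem

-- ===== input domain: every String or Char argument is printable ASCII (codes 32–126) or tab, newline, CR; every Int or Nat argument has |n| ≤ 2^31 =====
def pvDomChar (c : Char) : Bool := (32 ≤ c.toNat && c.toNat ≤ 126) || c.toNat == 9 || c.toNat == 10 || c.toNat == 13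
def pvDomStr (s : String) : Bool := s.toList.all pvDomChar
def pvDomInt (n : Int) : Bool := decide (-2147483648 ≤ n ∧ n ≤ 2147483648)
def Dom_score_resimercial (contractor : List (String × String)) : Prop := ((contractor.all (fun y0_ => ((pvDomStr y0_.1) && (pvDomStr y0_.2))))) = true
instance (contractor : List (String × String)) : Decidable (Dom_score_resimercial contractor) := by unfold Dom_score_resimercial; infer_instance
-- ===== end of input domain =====

-- B replaces A's six-way if/elif chain by a branch-free lookup: the four flags packed into a
-- 4-bit index into a precomputed 16-entry truth table; identical return value on every input.

-- shared module helper normalize_text (used by both A and B in Python)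
def normalize_text (text : String) : String :=
  if text = "" then "" else PySem.Str.strip (PySem.Str.lower text)

-- dict.get(k, '') on the association list (first match, per the dict type convention)
def pyDictGetD (d : List (String × String)) (k : String) (dflt : String) : String :=
  (d.lookup k).getD dflt

-- ===== PORT A =====
def score_resimercial (contractor : List (String × String)) : Int × String :=
  let name := normalize_text (pyDictGetD contractor "name" "")
  let tier := normalize_text (pyDictGetD contractor "tier" "")
  let has_commercial := ["commercial", "industrial", "business"].any (fun kw => PySem.Str.isIn kw name)
  let has_residential := ["residential", "home", "house"].any (fun kw => PySem.Str.isIn kw name)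
  let is_elite := ["elite", "premier", "platinum", "certified"].any (fun t => PySem.Str.isIn t tier)
  let oems := normalize_text (pyDictGetD contractor "OEMs_Certified" "")
  let has_generators := ["generac", "cummins", "briggs", "kohler"].any (fun g => PySem.Str.isIn g oems)
  let evidence : List String := []
  let sev : Int × List String :=
    if has_commercial && has_residential then
      (100, evidence ++ ["Explicit commercial + residential in name"])
    else if has_commercial then
      (70, evidence ++ ["Commercial indicator in name"])
    else if has_residential then
      (60, evidence ++ ["Residential indicator in name"])
    else if is_elite && has_generators then
      (75, evidence ++ ["Elite generator dealer (likely serves both markets)"])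
    else if has_generators then
      (50, evidence ++ ["Generator dealer (mixed market)"])
    else
      (40, evidence ++ ["Market scope unclear"])
  (sev.1, PySem.Str.join "; " sev.2)

-- ===== PORT B =====
-- the precomputed 16-entry truth table of Source B (_TABLE)
def pvTable : List (Int × String) :=
  [ (40, "Market scope unclear"),
    (50, "Generator dealer (mixed market)"),
    (40, "Market scope unclear"),
    (75, "Elite generator dealer (likely serves both markets)"),
    (60, "Residential indicator in name"),
    (60, "Residential indicator in name"),
    (60, "Residential indicator in name"),
    (60, "Residential indicator in name"),
    (70, "Commercial indicator in name"),
    (70, "Commercial indicator in name"),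
    (70, "Commercial indicator in name"),
    (70, "Commercial indicator in name"),
    (100, "Explicit commercial + residential in name"),
    (100, "Explicit commercial + residential in name"),
    (100, "Explicit commercial + residential in name"),
    (100, "Explicit commercial + residential in name") ]

def score_resimercial_alt (contractor : List (String × String)) : Int × String :=
  let name := normalize_text (pyDictGetD contractor "name" "")
  let tier := normalize_text (pyDictGetD contractor "tier" "")
  let oems := normalize_text (pyDictGetD contractor "OEMs_Certified" "")
  -- Python's bool arithmetic: 8*flag + 4*flag + 2*flag + flag
  let idx : Nat :=
    8 * (if ["commercial", "industrial", "business"].any (fun kw => PySem.Str.isIn kw name) then 1 else 0)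
    + 4 * (if ["residential", "home", "house"].any (fun kw => PySem.Str.isIn kw name) then 1 else 0)
    + 2 * (if ["elite", "premier", "platinum", "certified"].any (fun t => PySem.Str.isIn t tier) then 1 else 0)
    + (if ["generac", "cummins", "briggs", "kohler"].any (fun g => PySem.Str.isIn g oems) then 1 else 0)
  pvTable.getD idx (0, "")   -- idx < 16 always; _TABLE[idx] never raises

-- ===== PRECONDITION & SPEC =====
def Spec_score_resimercial (contractor : List (String × String)) (out : Int × String) : Prop := out = score_resimercial_alt contractor
instance (contractor : List (String × String)) (out : Int × String) : Decidable (Spec_score_resimercial contractor out) := by unfold Spec_score_resimercial; infer_instance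

-- ===== CLAIM (what is proved, stated in full; the proofs are below) =====
def Claim_equal_score_resimercial : Prop := ∀ (contractor : List (String × String)), Dom_score_resimercial contractor → Spec_score_resimercial contractor (score_resimercial contractor)

-- ===== LEMMAS AND PROOFS =====

-- For every valuation of the four flags, A's if/elif chain equals B's truth-table lookup.
theorem branches_eq (hc hr ie hg : Bool) :
    (let sev : Int × List String :=
      if hc && hr then (100, ([] : List String) ++ ["Explicit commercial + residential in name"])
      else if hc then (70, ([] : List String) ++ ["Commercial indicator in name"])
      else if hr then (60, ([] : List String) ++ ["Residential indicator in name"])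
      else if ie && hg then (75, ([] : List String) ++ ["Elite generator dealer (likely serves both markets)"])
      else if hg then (50, ([] : List String) ++ ["Generator dealer (mixed market)"])
      else (40, ([] : List String) ++ ["Market scope unclear"])
     (sev.1, PySem.Str.join "; " sev.2)) =
    pvTable.getD
      (8 * (if hc then 1 else 0) + 4 * (if hr then 1 else 0)
        + 2 * (if ie then 1 else 0) + (if hg then 1 else 0)) (0, "") := by
  cases hc <;> cases hr <;> cases ie <;> cases hg <;> rfl

-- ===== VERDICT (by name: the statement is the Claim_ definition above) =====
theorem score_resimercial_spec : Claim_equal_score_resimercial := by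
  intro contractor _
  unfold Spec_score_resimercial score_resimercial score_resimercial_alt
  exact branches_eq _ _ _ _
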